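-- pv_equiv track=rewrite | github.com/shhuan1989/algorithms | codeforces/1349B.py | solve
-- ===== SOURCE A (Python) =====
-- def solve(N, K, A):
--     A = [0 if v < K else (2 if v > K else 1) for v in A]
--     if A.count(1) == 0:
--         return False
--     else:
--         if N == 1:
--             return True
--         else:
--             for i in range(N):
--                 if A[i] > 0 and any(A[j] > 0 for j in range(i + 1, min(i + 3, N))):
--                     return True
--     return False
-- ===== SOURCE B (Python) =====
-- def solve(N, K, A):
--     # Two-stage: collect the indices (< N) of values >= K, then test whether any
--     # two consecutive collected indices are within distance <= 2.
--     idxs = [i for i, v in enumerate(A) if i < N and K <= v]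
--     return K in A and (N == 1 or any(b - a <= 2 for a, b in zip(idxs, idxs[1:])))
-- ===== Notes on version B (the rewrite author's own statement) =====
-- stated objective: alternative
-- what changed: Replaces A's 0/1/2 transform plus per-index forward two-element window scan (any() over range(i+1, min(i+3, N)) for each i) with a two-stage decomposition: first gather the list of indices < N whose value is >= K, then test whether any two CONSECUTIVE gathered indices are within distance 2 via zip(idxs, idxs[1:]).
-- outside the precondition, e.g. on solve(3, 1, [0, 1]): A raises IndexError, B returns False
import Mathlib
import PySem

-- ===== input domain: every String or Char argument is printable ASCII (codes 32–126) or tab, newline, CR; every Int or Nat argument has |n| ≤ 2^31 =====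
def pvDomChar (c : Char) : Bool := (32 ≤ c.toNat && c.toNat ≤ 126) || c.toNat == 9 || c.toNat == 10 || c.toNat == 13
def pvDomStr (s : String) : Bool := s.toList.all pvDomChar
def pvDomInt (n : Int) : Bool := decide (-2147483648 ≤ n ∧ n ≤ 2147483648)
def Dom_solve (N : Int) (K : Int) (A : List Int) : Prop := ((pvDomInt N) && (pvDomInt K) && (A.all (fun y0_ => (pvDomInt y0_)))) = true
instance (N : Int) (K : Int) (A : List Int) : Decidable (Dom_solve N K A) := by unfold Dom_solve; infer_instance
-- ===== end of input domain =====

-- B replaces A's 0/1/2 transform plus forward two-index window scan with a two-stage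
-- pipeline: gather indices < N with value >= K, then check consecutive gaps <= 2 (objective: alternative).


-- ===== PORT A =====
-- for i in range(N): if A[i] > 0 and any(A[j] > 0 for j in range(i+1, min(i+3, N))): return True
def solveLoopA (N : Int) (A' : List Int) : List Int → Bool
  | [] => false
  | i :: rest =>
    if PySem.List.pyGetD A' i 0 > 0 ∧
        ((PySem.List.pyRange (i + 1) (min (i + 3) N) 1).any
          fun j => decide (PySem.List.pyGetD A' j 0 > 0)) = true
    then true
    else solveLoopA N A' rest

def solve (N : Int) (K : Int) (A : List Int) : Bool :=
  let A' := A.map (fun v => if v < K then (0 : Int) else if v > K then 2 else 1)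
  if PySem.List.count A' 1 = 0 then false
  else if N = 1 then true
  else solveLoopA N A' (PySem.List.pyRange 0 N 1)

-- ===== PORT B =====
-- idxs = [i for i, v in enumerate(A) if i < N and K <= v]
def collectIdxs (N K : Int) : List (Int × Int) → List Int
  | [] => []
  | (i, v) :: rest =>
    if i < N ∧ K ≤ v then i :: collectIdxs N K rest else collectIdxs N K rest

-- return K in A and (N == 1 or any(b - a <= 2 for a, b in zip(idxs, idxs[1:])))
def solve_alt (N : Int) (K : Int) (A : List Int) : Bool :=
  let idxs := collectIdxs N K (PySem.List.enumerate A 0)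
  A.contains K && (decide (N = 1) || (idxs.zip (idxs.drop 1)).any fun p => decide (p.2 - p.1 ≤ 2))

-- ===== PRECONDITION & SPEC =====
-- Pre_ excludes N > len(A) when K occurs in A and N ≠ 1: there A's index loop can run past
-- the end of A and raise IndexError (it returns early only if it finds a close pair first).
def Pre_solve (N : Int) (K : Int) (A : List Int) : Prop :=
  N ≤ (A.length : Int) ∨ ¬ K ∈ A ∨ N = 1
instance (N : Int) (K : Int) (A : List Int) : Decidable (Pre_solve N K A) := by unfold Pre_solve; infer_instance
def pvWitness_solve : Int × Int × List Int := (4, 2, [1, 2, 0, 3])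

def Spec_solve (N : Int) (K : Int) (A : List Int) (out : Bool) : Prop := out = solve_alt N K A
instance (N : Int) (K : Int) (A : List Int) (out : Bool) : Decidable (Spec_solve N K A out) := by unfold Spec_solve; infer_instance

-- ===== CLAIM (what is proved, stated in full; the proofs are below) =====
def Claim_equal_solve : Prop := ∀ (N : Int) (K : Int) (A : List Int), Dom_solve N K A → Pre_solve N K A → Spec_solve N K A (solve N K A)

-- ===== LEMMAS AND PROOFS =====

theorem pv_transform_pos_iff (K v : Int) :
    (0 : Int) < (if v < K then (0 : Int) else if v > K then 2 else 1) ↔ K ≤ v := by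
  split_ifs <;> omega

theorem pv_windowA_iff (N i : Int) (A' : List Int) :
    ((PySem.List.pyRange (i + 1) (min (i + 3) N) 1).any
        fun j => decide (PySem.List.pyGetD A' j 0 > 0)) = true ↔
      ∃ j, i < j ∧ j ≤ i + 2 ∧ j < N ∧ 0 < PySem.List.pyGetD A' j 0 := by
  simp only [List.any_eq_true, PySem.List.mem_pyRange_one, lt_min_iff, decide_eq_true_eq]
  constructor
  · rintro ⟨j, ⟨h1, h2, h3⟩, h4⟩; exact ⟨j, by omega, by omega, h3, h4⟩
  · rintro ⟨j, h1, h2, h3, h4⟩; exact ⟨j, ⟨by omega, by omega, h3⟩, h4⟩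

theorem pv_loopA_iff (N : Int) (A' : List Int) (l : List Int) :
    solveLoopA N A' l = true ↔
      ∃ i ∈ l, 0 < PySem.List.pyGetD A' i 0 ∧
        ∃ j, i < j ∧ j ≤ i + 2 ∧ j < N ∧ 0 < PySem.List.pyGetD A' j 0 := by
  induction l with
  | nil => simp [solveLoopA]
  | cons a rest ih =>
    rw [solveLoopA]
    split_ifs with h
    · simp only [true_iff]
      obtain ⟨h1, h2⟩ := h
      exact ⟨a, List.mem_cons_self, h1, (pv_windowA_iff N a A').mp h2⟩
    · rw [ih]
      constructor
      · rintro ⟨i, hm, hi⟩; exact ⟨i, List.mem_cons_of_mem a hm, hi⟩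
      · rintro ⟨i, hm, h1, hj⟩
        rcases List.mem_cons.mp hm with rfl | hm
        · exact absurd ⟨h1, (pv_windowA_iff N i A').mpr hj⟩ h
        · exact ⟨i, hm, h1, hj⟩

theorem pv_count_iff (K : Int) (A : List Int) :
    PySem.List.count (A.map fun v => if v < K then (0 : Int) else if v > K then 2 else 1) 1 = 0 ↔
      A.contains K = false := by
  simp only [PySem.List.count_eq, List.count_eq_zero, List.mem_map, not_exists,
    List.contains_eq_mem, decide_eq_false_iff_not]
  constructor
  · intro h hK
    have := h K
    simp at this
    exact this hK
  · intro h v hv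
    obtain ⟨hvA, hveq⟩ := hv
    split_ifs at hveq with h1 h2
    · omega
    · omega
    · have : v = K := by omega
      exact h (this ▸ hvA)

theorem pv_pos_iff (K : Int) (A : List Int) (t : Int) (h0 : 0 ≤ t)
    (hlen : t < (A.length : Int)) :
    0 < PySem.List.pyGetD (A.map fun v => if v < K then (0 : Int) else if v > K then 2 else 1) t 0 ↔
      K ≤ A.getD t.toNat 0 := by
  rw [PySem.List.pyGetD_eq_getElem _ _ h0 (by simpa using hlen)]
  rw [List.getElem_map, List.getD_eq_getElem A 0 (by omega)]
  exact pv_transform_pos_iff K _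

theorem pv_mem_collect (N K : Int) (xs : List Int) (s j : Int) :
    j ∈ collectIdxs N K (PySem.List.enumerate xs s) ↔
      ∃ k : Nat, k < xs.length ∧ j = s + (k : Int) ∧ j < N ∧ K ≤ xs.getD k 0 := by
  induction xs generalizing s with
  | nil => simp [PySem.List.enumerate, collectIdxs]
  | cons v rest ih =>
    rw [PySem.List.enumerate_cons, collectIdxs]
    split_ifs with h
    · simp only [List.mem_cons, ih]
      constructor
      · rintro (rfl | ⟨k, hk, rfl, hN, hq⟩)
        · exact ⟨0, by simp, by simp, h.1, by simpa using h.2⟩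
        · exact ⟨k + 1, by simpa using hk, by push_cast; ring, hN, by simpa using hq⟩
      · rintro ⟨k, hk, rfl, hN, hq⟩
        cases k with
        | zero => left; simp
        | succ k =>
          right
          exact ⟨k, by simpa using hk, by push_cast; ring, hN, by simpa using hq⟩
    · rw [ih]
      constructor
      · rintro ⟨k, hk, rfl, hN, hq⟩
        exact ⟨k + 1, by simpa using hk, by push_cast; ring, hN, by simpa using hq⟩
      · rintro ⟨k, hk, rfl, hN, hq⟩
        cases k with
        | zero => exact absurd ⟨by simpa using hN, by simpa using hq⟩ h
        | succ k =>
          exact ⟨k, by simpa using hk, by push_cast; ring, hN, by simpa using hq⟩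

theorem pv_collect_pairwise (N K : Int) (xs : List Int) (s : Int) :
    (collectIdxs N K (PySem.List.enumerate xs s)).Pairwise (· < ·) := by
  induction xs generalizing s with
  | nil => simp [PySem.List.enumerate, collectIdxs]
  | cons v rest ih =>
    rw [PySem.List.enumerate_cons, collectIdxs]
    split_ifs with h
    · refine List.Pairwise.cons ?_ (ih (s + 1))
      intro j hj
      obtain ⟨k, _, rfl, _, _⟩ := (pv_mem_collect N K rest (s + 1) j).mp hj
      omega
    · exact ih (s + 1)

theorem pv_adjacent_iff (l : List Int) (hs : l.Pairwise (· < ·)) :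
    ((l.zip (l.drop 1)).any fun p => decide (p.2 - p.1 ≤ 2)) = true ↔
      ∃ a ∈ l, ∃ b ∈ l, a < b ∧ b - a ≤ 2 := by
  induction l with
  | nil => simp
  | cons x t ih =>
    cases t with
    | nil => simp
    | cons y r =>
      obtain ⟨hx, hyr⟩ := List.pairwise_cons.mp hs
      have hxy : x < y := hx y (by simp)
      have hstep : (((x :: y :: r).zip ((x :: y :: r).drop 1)).any
          fun p => decide (p.2 - p.1 ≤ 2)) =
          (decide (y - x ≤ 2) || ((y :: r).zip ((y :: r).drop 1)).any
            fun p => decide (p.2 - p.1 ≤ 2)) := by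
        simp [List.zip]
      rw [hstep, Bool.or_eq_true, decide_eq_true_eq, ih hyr]
      constructor
      · rintro (h2 | ⟨a, ha, b, hb, hab, hg⟩)
        · exact ⟨x, by simp, y, by simp, hxy, h2⟩
        · exact ⟨a, List.mem_cons_of_mem x ha, b, List.mem_cons_of_mem x hb, hab, hg⟩
      · rintro ⟨a, ha, b, hb, hab, hg⟩
        have hymin : ∀ c ∈ (y :: r), y ≤ c := by
          intro c hc
          rcases List.mem_cons.mp hc with rfl | hc
          · exact le_refl c
          · exact le_of_lt ((List.pairwise_cons.mp hyr).1 c hc)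
        rcases List.mem_cons.mp ha with rfl | ha
        · -- a = x : the pair starting at x; y is between, so y - x ≤ 2
          rcases List.mem_cons.mp hb with rfl | hb
          · omega
          · have := hymin b hb
            left; omega
        · have hbx : b ≠ x := by
            intro hbx
            have := hymin a ha
            omega
          rcases List.mem_cons.mp hb with rfl | hb
          · exact absurd rfl hbx
          · exact Or.inr ⟨a, ha, b, hb, hab, hg⟩

theorem pv_B_pair_iff (N K : Int) (A : List Int) :
    (((collectIdxs N K (PySem.List.enumerate A 0)).zip
        ((collectIdxs N K (PySem.List.enumerate A 0)).drop 1)).any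
      fun p => decide (p.2 - p.1 ≤ 2)) = true ↔
      ∃ m k : Nat, m < k ∧ k < A.length ∧ (k : Int) < N ∧ (k : Int) - (m : Int) ≤ 2 ∧
        K ≤ A.getD m 0 ∧ K ≤ A.getD k 0 := by
  rw [pv_adjacent_iff _ (pv_collect_pairwise N K A 0)]
  constructor
  · rintro ⟨a, ha, b, hb, hab, hg⟩
    obtain ⟨m, hm, rfl, hmN, hqm⟩ := (pv_mem_collect N K A 0 a).mp ha
    obtain ⟨k, hk, rfl, hkN, hqk⟩ := (pv_mem_collect N K A 0 b).mp hb
    exact ⟨m, k, by omega, hk, by omega, by omega, hqm, hqk⟩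
  · rintro ⟨m, k, hmk, hk, hkN, hg, hqm, hqk⟩
    refine ⟨(m : Int), ?_, (k : Int), ?_, by omega, by omega⟩
    · exact (pv_mem_collect N K A 0 (m : Int)).mpr ⟨m, by omega, by omega, by omega, hqm⟩
    · exact (pv_mem_collect N K A 0 (k : Int)).mpr ⟨k, hk, by omega, by omega, hqk⟩

-- ===== VERDICT (by name: the statement is the Claim_ definition above) =====
theorem solve_spec : Claim_equal_solve := by
  intro N K A _ hpre
  unfold Spec_solve
  unfold Pre_solve at hpre
  simp only [solve, solve_alt]
  by_cases hc : PySem.List.count (A.map fun v => if v < K then (0 : Int) else if v > K then 2 else 1) 1 = 0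
  · have hK : A.contains K = false := (pv_count_iff K A).mp hc
    rw [if_pos hc, hK, Bool.false_and]
  · have hK : A.contains K = true := by
      cases h : A.contains K
      · exact absurd ((pv_count_iff K A).mpr h) hc
      · rfl
    rw [if_neg hc, hK, Bool.true_and]
    by_cases hN1 : N = 1
    · rw [if_pos hN1]
      simp [hN1]
    · rw [if_neg hN1]
      have hlen : N ≤ (A.length : Int) := by
        rcases hpre with h | h | h
        · exact h
        · exact absurd (by simpa using hK) h
        · exact absurd h hN1
      have hN1' : decide (N = 1) = false := by simp [hN1]
      rw [hN1', Bool.false_or]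
      rw [Bool.eq_iff_iff, pv_loopA_iff, pv_B_pair_iff]
      constructor
      · rintro ⟨i, hmem, hpi, j, hij, hj2, hjN, hpj⟩
        rw [PySem.List.mem_pyRange_one] at hmem
        obtain ⟨hi0, hiN⟩ := hmem
        refine ⟨i.toNat, j.toNat, by omega, by omega, by omega, by omega, ?_, ?_⟩
        · have := (pv_pos_iff K A i hi0 (by omega)).mp hpi
          simpa using this
        · have := (pv_pos_iff K A j (by omega) (by omega)).mp hpj
          simpa using this
      · rintro ⟨m, k, hmk, hk, hkN, hg, hqm, hqk⟩
        refine ⟨(m : Int), ?_, ?_, (k : Int), by omega, by omega, by omega, ?_⟩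
        · rw [PySem.List.mem_pyRange_one]; omega
        · have := (pv_pos_iff K A (m : Int) (by omega) (by omega)).mpr
          simpa using this (by simpa using hqm)
        · have := (pv_pos_iff K A (k : Int) (by omega) (by omega)).mpr
          simpa using this (by simpa using hqk)
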